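-- pv_equiv track=rewrite | github.com/samisnotinsane/chess | chess/move.py | _is_valid_col
-- ===== SOURCE A (Python) =====
-- def _is_valid_col(col: str) -> bool:
--     legal_columns = ["a", "b", "c", "d", "e", "f", "g", "h"]
--     for c in legal_columns:
--         if c.upper() == col:
--             return True
--         if c.lower() == col:
--             return True
--     return False
-- ===== SOURCE B (Python) =====
-- def _is_valid_col(col: str) -> bool:
--     if len(col) != 1:
--         return False
--     c = ord(col)
--     return ord('a') <= c <= ord('h') or ord('A') <= c <= ord('H')
-- ===== Notes on version B (the rewrite author's own statement) =====
-- stated objective: simpler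
-- what changed: Replaced the 8-element list scan with 16 string comparisons by a length-1 guard plus a closed-form ordinal range test on the character code ('a'..'h' or 'A'..'H').
import Mathlib
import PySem

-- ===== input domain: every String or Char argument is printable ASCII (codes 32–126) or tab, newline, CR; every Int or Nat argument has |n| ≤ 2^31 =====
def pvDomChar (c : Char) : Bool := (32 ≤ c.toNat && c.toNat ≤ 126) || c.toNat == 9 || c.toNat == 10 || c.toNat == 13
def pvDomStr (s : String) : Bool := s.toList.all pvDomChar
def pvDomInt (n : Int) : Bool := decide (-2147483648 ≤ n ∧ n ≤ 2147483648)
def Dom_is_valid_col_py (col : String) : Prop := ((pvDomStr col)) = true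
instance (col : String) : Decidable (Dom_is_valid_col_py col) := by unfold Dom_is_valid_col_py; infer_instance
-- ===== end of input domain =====

-- B replaces A's 8-element list scan (16 string comparisons) with a length-1 guard
-- plus a closed-form character-code range test; objective: simpler.


-- ===== PORT A =====
-- 'for c in legal_columns: if c.upper() == col: return True; if c.lower() == col: return True' / 'return False'
def isValidColLoop (cs : List String) (col : String) : Bool :=
  match cs with
  | [] => false
  | c :: rest =>
    if PySem.Str.upper c == col then true
    else if PySem.Str.lower c == col then true
    else isValidColLoop rest col

def is_valid_col_py (col : String) : Bool :=
  isValidColLoop ["a", "b", "c", "d", "e", "f", "g", "h"] col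

-- ===== PORT B =====
-- 'if len(col) != 1: return False'; 'c = ord(col)'; 'return 97 <= c <= 104 or 65 <= c <= 72'
def is_valid_col_py_alt (col : String) : Bool :=
  if col.toList.length ≠ 1 then false
  else
    match col.toList with
    | [c] => (97 ≤ c.toNat && c.toNat ≤ 104) || (65 ≤ c.toNat && c.toNat ≤ 72)
    | _ => false

-- ===== PRECONDITION & SPEC =====
def Spec_is_valid_col_py (col : String) (out : Bool) : Prop := out = is_valid_col_py_alt col
instance (col : String) (out : Bool) : Decidable (Spec_is_valid_col_py col out) := by unfold Spec_is_valid_col_py; infer_instance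

-- ===== CLAIM (what is proved, stated in full; the proofs are below) =====
def Claim_equal_is_valid_col_py : Prop := ∀ (col : String), Dom_is_valid_col_py col → Spec_is_valid_col_py col (is_valid_col_py col)

-- ===== LEMMAS AND PROOFS =====

theorem char_eq_iff_toNat (c d : Char) : c = d ↔ c.toNat = d.toNat := by
  constructor
  · rintro rfl; rfl
  · intro h; apply Char.ext; apply UInt32.toBitVec_inj.mp; apply BitVec.toNat_inj.mp; exact h

theorem loop_eq_any (cs : List String) (col : String) :
    isValidColLoop cs col = cs.any (fun c => (PySem.Str.upper c == col) || (PySem.Str.lower c == col)) := by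
  induction cs with
  | nil => rfl
  | cons c rest ih =>
    simp only [isValidColLoop, List.any_cons, ← ih]
    split_ifs with h1 h2 <;> simp [*]

theorem str_beq_toList (s col : String) : (s == col) = (col.toList == s.toList) := by
  rw [Bool.eq_iff_iff]
  simp only [beq_iff_eq, String.ext_iff]
  exact eq_comm

-- ===== VERDICT (by name: the statement is the Claim_ definition above) =====
set_option maxRecDepth 8000 in
theorem is_valid_col_py_spec : Claim_equal_is_valid_col_py := by
  intro col _
  unfold Spec_is_valid_col_py is_valid_col_py is_valid_col_py_alt
  rw [loop_eq_any]
  simp only [List.any_cons, List.any_nil, str_beq_toList,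
    show ∀ s : String, (PySem.Str.upper s).toList = PySem.Chars.upper s.toList from PySem.Str.toList_upper,
    show ∀ s : String, (PySem.Str.lower s).toList = PySem.Chars.lower s.toList from PySem.Str.toList_lower,
    show PySem.Chars.upper ("a".toList) = ['A'] from by decide,
    show PySem.Chars.upper ("b".toList) = ['B'] from by decide,
    show PySem.Chars.upper ("c".toList) = ['C'] from by decide,
    show PySem.Chars.upper ("d".toList) = ['D'] from by decide,
    show PySem.Chars.upper ("e".toList) = ['E'] from by decide,
    show PySem.Chars.upper ("f".toList) = ['F'] from by decide,
    show PySem.Chars.upper ("g".toList) = ['G'] from by decide,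
    show PySem.Chars.upper ("h".toList) = ['H'] from by decide,
    show PySem.Chars.lower ("a".toList) = ['a'] from by decide,
    show PySem.Chars.lower ("b".toList) = ['b'] from by decide,
    show PySem.Chars.lower ("c".toList) = ['c'] from by decide,
    show PySem.Chars.lower ("d".toList) = ['d'] from by decide,
    show PySem.Chars.lower ("e".toList) = ['e'] from by decide,
    show PySem.Chars.lower ("f".toList) = ['f'] from by decide,
    show PySem.Chars.lower ("g".toList) = ['g'] from by decide,
    show PySem.Chars.lower ("h".toList) = ['h'] from by decide]
  rcases h : col.toList with _ | ⟨c, _ | ⟨d, rest⟩⟩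
  · decide
  · rw [Bool.eq_iff_iff]
    simp only [Bool.or_eq_true, beq_iff_eq, List.cons.injEq, and_true]
    rw [if_neg (by simp)]
    simp only [char_eq_iff_toNat,
      show ('A').toNat = 65 from rfl, show ('a').toNat = 97 from rfl,
      show ('B').toNat = 66 from rfl, show ('b').toNat = 98 from rfl,
      show ('C').toNat = 67 from rfl, show ('c').toNat = 99 from rfl,
      show ('D').toNat = 68 from rfl, show ('d').toNat = 100 from rfl,
      show ('E').toNat = 69 from rfl, show ('e').toNat = 101 from rfl,
      show ('F').toNat = 70 from rfl, show ('f').toNat = 102 from rfl,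
      show ('G').toNat = 71 from rfl, show ('g').toNat = 103 from rfl,
      show ('H').toNat = 72 from rfl, show ('h').toNat = 104 from rfl,
      Bool.or_eq_true, Bool.and_eq_true, decide_eq_true_iff, Bool.false_eq_true, or_false]
    omega
  · simp
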